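-- pv_equiv track=rewrite | github.com/daniel-reich/ubiquitous-fiesta | XgJ3L3GF7o2dEaPAW_15.py | shared_letters
-- ===== SOURCE A (Python) =====
-- def shared_letters(a, b):
--   c=""
--   for x in a.lower():
--     if x in b.lower():
--       if x not in c:
--         c+=x
--   c=sorted(c)
--   return "".join(c)
-- ===== SOURCE B (Python) =====
-- def shared_letters(a, b):
--   xs = sorted(set(a.lower()))
--   ys = sorted(set(b.lower()))
--   i = j = 0
--   out = []
--   while i < len(xs) and j < len(ys):
--     if xs[i] == ys[j]:
--       out.append(xs[i])
--       i += 1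
--       j += 1
--     elif xs[i] < ys[j]:
--       i += 1
--     else:
--       j += 1
--   return "".join(out)
-- ===== Notes on version B (the rewrite author's own statement) =====
-- stated objective: faster
-- what changed: Replaced A's single scan with per-character membership tests in b.lower() and manual dedup plus a final sort by a sort-then-merge algorithm: dedup-and-sort each string once, then a two-pointer merge of the two sorted unique lists that emits the common letters already in order, with no membership tests and no final sort.
import Mathlib
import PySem

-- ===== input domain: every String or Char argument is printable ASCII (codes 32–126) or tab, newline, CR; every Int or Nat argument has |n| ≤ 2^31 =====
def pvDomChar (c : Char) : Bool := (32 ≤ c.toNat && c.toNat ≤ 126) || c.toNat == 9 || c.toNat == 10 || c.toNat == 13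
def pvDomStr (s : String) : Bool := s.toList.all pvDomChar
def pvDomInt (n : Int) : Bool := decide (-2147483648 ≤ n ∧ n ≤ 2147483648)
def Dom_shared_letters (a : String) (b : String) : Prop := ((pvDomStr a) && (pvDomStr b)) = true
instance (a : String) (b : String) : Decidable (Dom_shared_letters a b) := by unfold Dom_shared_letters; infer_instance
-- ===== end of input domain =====

-- B replaces A's quadratic membership-scan-then-sort by sort-then-merge: dedup+sort both strings
-- once, then a two-pointer merge emits the common letters already in order (faster, asymptotic).

-- ===== PORT A =====
-- Port of A: scan a.lower(), keep chars that occur in b.lower() and not yet in c, then sort.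
def shared_letters (a : String) (b : String) : String :=
  let bl := PySem.Chars.lower b.toList
  let c := (PySem.Chars.lower a.toList).foldl
    (fun c x => if x ∈ bl then (if x ∉ c then c ++ [x] else c) else c) []
  String.ofList (PySem.List.sorted c (fun x => x) false)

-- ===== PORT B =====
-- B's two-pointer merge loop, as recursion on the two sorted unique lists.
def mergeCommon : List Char → List Char → List Char
  | [], _ => []
  | _ :: _, [] => []
  | x :: xs, y :: ys =>
    if x = y then x :: mergeCommon xs ys
    else if x < y then mergeCommon xs (y :: ys)
    else mergeCommon (x :: xs) ys
termination_by xs ys => xs.length + ys.length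

-- Port of B: sorted(set(a.lower())), sorted(set(b.lower())), two-pointer merge, join.
def shared_letters_alt (a : String) (b : String) : String :=
  let xs := PySem.List.sorted (PySem.Set.ofList (PySem.Chars.lower a.toList)) (fun x => x) false
  let ys := PySem.List.sorted (PySem.Set.ofList (PySem.Chars.lower b.toList)) (fun x => x) false
  String.ofList (mergeCommon xs ys)

-- ===== PRECONDITION & SPEC =====
def Spec_shared_letters (a : String) (b : String) (out : String) : Prop := out = shared_letters_alt a b
instance (a : String) (b : String) (out : String) : Decidable (Spec_shared_letters a b out) := by unfold Spec_shared_letters; infer_instance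

-- ===== CLAIM (what is proved, stated in full; the proofs are below) =====
def Claim_equal_shared_letters : Prop := ∀ (a : String) (b : String), Dom_shared_letters a b → Spec_shared_letters a b (shared_letters a b)

-- ===== LEMMAS AND PROOFS =====

-- The merge of two strictly increasing lists is strictly increasing and holds exactly the common elements.
theorem mergeCommon_spec : ∀ (xs ys : List Char), xs.Pairwise (· < ·) → ys.Pairwise (· < ·) →
    (mergeCommon xs ys).Pairwise (· < ·) ∧ ∀ z, z ∈ mergeCommon xs ys ↔ z ∈ xs ∧ z ∈ ys := by
  intro xs ys hx hy
  induction xs, ys using mergeCommon.induct with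
  | case1 ys => simp [mergeCommon]
  | case2 x xs => simp [mergeCommon]
  | case3 xs x ys ih =>
    rw [List.pairwise_cons] at hx hy
    obtain ⟨hxm, hmem⟩ := ih hx.2 hy.2
    have hstep : mergeCommon (x :: xs) (x :: ys) = x :: mergeCommon xs ys := by
      conv_lhs => rw [mergeCommon.eq_def]
      simp
    rw [hstep]
    refine ⟨List.pairwise_cons.2 ⟨fun z hz => hx.1 z ((hmem z).1 hz).1, hxm⟩, ?_⟩
    intro z
    simp only [List.mem_cons, hmem z]
    constructor
    · rintro (rfl | ⟨h1, h2⟩) <;> simp_all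
    · rintro ⟨(rfl | h1), (h | h2)⟩ <;> simp_all
  | case4 x xs y ys hne hlt ih =>
    rw [List.pairwise_cons] at hx
    obtain ⟨hxm, hmem⟩ := ih hx.2 hy
    have hxnot : x ∉ y :: ys := by
      rw [List.pairwise_cons] at hy
      intro hc
      rcases List.mem_cons.1 hc with rfl | hc
      · exact hne rfl
      · exact absurd (lt_trans hlt (hy.1 x hc)) (lt_irrefl x)
    refine ⟨by simpa [mergeCommon, hne, hlt] using hxm, ?_⟩
    intro z
    simp only [mergeCommon, if_neg hne, if_pos hlt, hmem z, List.mem_cons]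
    constructor
    · rintro ⟨h1, h2⟩; exact ⟨Or.inr h1, h2⟩
    · rintro ⟨(rfl | h1), h2⟩
      · exact absurd (List.mem_cons.2 h2) hxnot
      · exact ⟨h1, h2⟩
  | case5 x xs y ys hne hnlt ih =>
    rw [List.pairwise_cons] at hy
    obtain ⟨hxm, hmem⟩ := ih hx hy.2
    have hynot : y ∉ x :: xs := by
      rw [List.pairwise_cons] at hx
      intro hc
      rcases List.mem_cons.1 hc with rfl | hc
      · exact hne rfl
      · have hyx : y < x := lt_of_le_of_ne (not_lt.1 hnlt) (fun h => hne h.symm)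
        exact absurd (lt_trans hyx (hx.1 y hc)) (lt_irrefl y)
    refine ⟨by simpa [mergeCommon, hne, hnlt] using hxm, ?_⟩
    intro z
    simp only [mergeCommon, if_neg hne, if_neg hnlt, hmem z, List.mem_cons]
    constructor
    · rintro ⟨h1, h2⟩; exact ⟨h1, Or.inr h2⟩
    · rintro ⟨h1, (rfl | h2)⟩
      · exact absurd (List.mem_cons.2 h1) hynot
      · exact ⟨h1, h2⟩

-- A's loop keeps exactly the characters of la that are in lb, without duplicates.
theorem loopA_nodup_mem (lb : List Char) :
    ∀ (la c : List Char), c.Nodup →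
      (la.foldl (fun c x => if x ∈ lb then (if x ∉ c then c ++ [x] else c) else c) c).Nodup ∧
      ∀ y, y ∈ la.foldl (fun c x => if x ∈ lb then (if x ∉ c then c ++ [x] else c) else c) c ↔
            y ∈ c ∨ (y ∈ la ∧ y ∈ lb) := by
  intro la
  induction la with
  | nil => intro c hc; simpa using hc
  | cons x xs ih =>
    intro c hc
    simp only [List.foldl_cons]
    by_cases hxb : x ∈ lb
    · by_cases hxc : x ∈ c
      · rw [if_pos hxb, if_neg (by simp [hxc])]
        obtain ⟨h1, h2⟩ := ih c hc
        exact ⟨h1, fun y => by rw [h2 y]; simp only [List.mem_cons]; aesop⟩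
      · rw [if_pos hxb, if_pos (by simp [hxc])]
        have hnd : (c ++ [x]).Nodup := by
          simp [List.nodup_append, hc]
          exact fun a ha h => hxc (h ▸ ha)
        obtain ⟨h1, h2⟩ := ih (c ++ [x]) hnd
        exact ⟨h1, fun y => by
          rw [h2 y]; simp only [List.mem_append, List.mem_cons]; aesop⟩
    · rw [if_neg hxb]
      obtain ⟨h1, h2⟩ := ih c hc
      exact ⟨h1, fun y => by rw [h2 y]; simp only [List.mem_cons]; aesop⟩

-- Two strictly increasing lists with the same members are equal.
theorem eq_of_pairwise_lt_of_mem_iff {l₁ l₂ : List Char}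
    (h₁ : l₁.Pairwise (· < ·)) (h₂ : l₂.Pairwise (· < ·))
    (hmem : ∀ z, z ∈ l₁ ↔ z ∈ l₂) : l₁ = l₂ := by
  have hn₁ : l₁.Nodup := h₁.imp (fun h => ne_of_lt h)
  have hn₂ : l₂.Nodup := h₂.imp (fun h => ne_of_lt h)
  have hperm : l₁.Perm l₂ := (List.perm_ext_iff_of_nodup hn₁ hn₂).2 hmem
  exact List.Perm.eq_of_pairwise (fun a b _ _ h h' => absurd h' (lt_asymm h)) h₁ h₂ hperm

-- ===== VERDICT (by name: the statement is the Claim_ definition above) =====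
theorem shared_letters_spec : Claim_equal_shared_letters := by
  intro a b _
  unfold Spec_shared_letters shared_letters shared_letters_alt
  dsimp only
  set la := PySem.Chars.lower a.toList with hla
  set lb := PySem.Chars.lower b.toList with hlb
  set xs := PySem.List.sorted (PySem.Set.ofList la) (fun x => x) false with hxs
  set ys := PySem.List.sorted (PySem.Set.ofList lb) (fun x => x) false with hys
  have hpx : xs.Pairwise (· < ·) := PySem.List.sorted_ofList_pairwise_lt la
  have hpy : ys.Pairwise (· < ·) := PySem.List.sorted_ofList_pairwise_lt lb
  obtain ⟨hmgp, hmgm⟩ := mergeCommon_spec xs ys hpx hpy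
  obtain ⟨hnd, hmem⟩ := loopA_nodup_mem lb la [] List.nodup_nil
  set c := la.foldl (fun c x => if x ∈ lb then (if x ∉ c then c ++ [x] else c) else c) [] with hc
  have hsp : (PySem.List.sorted c (fun x => x) false).Pairwise (· < ·) := by
    have hle := PySem.List.sorted_pairwise c (fun x => x) (κ := Char)
    have hndp : (PySem.List.sorted c (fun x => x) false).Nodup :=
      (PySem.List.sorted_perm c (fun x => x) false).nodup_iff.2 hnd
    exact (hle.and hndp).imp (fun h => lt_of_le_of_ne h.1 h.2)
  congr 1
  refine eq_of_pairwise_lt_of_mem_iff hsp hmgp ?_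
  intro z
  rw [PySem.List.mem_sorted, hmgm z, hxs, hys,
    PySem.List.mem_sorted, PySem.List.mem_sorted, PySem.Set.mem_ofList, PySem.Set.mem_ofList,
    hmem z]
  simp
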